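-- pv_equiv track=rewrite | github.com/Mohamed-24-03-2022/python_tp_oop | S03_TP06_template.py | get_cell_number_from_coordinates
-- ===== SOURCE A (Python) =====
-- def get_cell_number_from_coordinates(grid, line_number, column_number):
--     """ Converti les coordonnées ('line_number', 'column_number') de 'grid' vers le numéro de case correspondant."""
--     line = 0
--     cell_number = 0
--     for l in range(len(grid)):
--         col = 0
--         for _ in range(len(grid[l])):
--             col += 1
--             cell_number += 1
--             if (line_number == line and column_number == col):
--                 return cell_number
--         line += 1
--
--     return None
-- ===== SOURCE B (Python) =====
-- def get_cell_number_from_coordinates(grid, line_number, column_number):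
--     """ Converti les coordonnées ('line_number', 'column_number') de 'grid' vers le numéro de case correspondant."""
--     if 0 <= line_number < len(grid) and 1 <= column_number <= len(grid[line_number]):
--         return sum(len(row) for row in grid[:line_number]) + column_number
--     return None
-- ===== Notes on version B (the rewrite author's own statement) =====
-- stated objective: faster
-- what changed: Replaces the full scan over every cell with a bounds check and a prefix sum of the row lengths before the target row plus the 1-based column.
import Mathlib
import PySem

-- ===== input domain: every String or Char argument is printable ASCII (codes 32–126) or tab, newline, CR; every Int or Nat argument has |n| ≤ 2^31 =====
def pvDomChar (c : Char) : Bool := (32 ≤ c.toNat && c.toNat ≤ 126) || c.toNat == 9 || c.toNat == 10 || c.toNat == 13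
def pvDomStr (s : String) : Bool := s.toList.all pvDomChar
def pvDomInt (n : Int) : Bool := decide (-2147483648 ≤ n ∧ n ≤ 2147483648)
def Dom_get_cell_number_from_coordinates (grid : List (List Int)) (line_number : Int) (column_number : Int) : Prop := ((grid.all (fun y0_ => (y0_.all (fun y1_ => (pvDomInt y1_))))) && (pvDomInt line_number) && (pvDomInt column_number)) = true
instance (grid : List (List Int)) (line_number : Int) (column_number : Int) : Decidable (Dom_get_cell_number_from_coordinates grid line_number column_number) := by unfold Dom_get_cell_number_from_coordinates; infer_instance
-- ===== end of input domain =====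

-- B replaces A's scan over every cell by a bounds check plus a prefix sum of row lengths (objective: faster, asymptotic).

-- ===== PORT A =====
-- inner `for _ in range(len(grid[l]))` loop: counts col/cell_number, may return early;
-- result = (early return value if any, cell_number after the loop)
def pvAInner (cnt : Nat) (col cell line line_number column_number : Int) : Option Int × Int :=
  match cnt with
  | 0 => (none, cell)
  | n + 1 =>
    let col := col + 1
    let cell := cell + 1
    if line_number = line ∧ column_number = col then (some cell, cell)
    else pvAInner n col cell line line_number column_number

-- outer `for l in range(len(grid))` loop over the rows, carrying line and cell_number
def pvAOuter (rows : List (List Int)) (line cell line_number column_number : Int) : Option Int :=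
  match rows with
  | [] => none
  | r :: rs =>
    match pvAInner r.length 0 cell line line_number column_number with
    | (some v, _) => some v
    | (none, cell') => pvAOuter rs (line + 1) cell' line_number column_number

def get_cell_number_from_coordinates (grid : List (List Int)) (line_number : Int) (column_number : Int) : Option Int :=
  pvAOuter grid 0 0 line_number column_number

-- ===== PORT B =====
def get_cell_number_from_coordinates_alt (grid : List (List Int)) (line_number : Int) (column_number : Int) : Option Int :=
  if 0 ≤ line_number ∧ line_number < grid.length ∧
     1 ≤ column_number ∧ column_number ≤ (grid.getD line_number.toNat []).length then
    some ((((grid.take line_number.toNat).map List.length).sum : Int) + column_number)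
  else none

-- ===== PRECONDITION & SPEC =====
def Spec_get_cell_number_from_coordinates (grid : List (List Int)) (line_number : Int) (column_number : Int) (out : Option Int) : Prop := out = get_cell_number_from_coordinates_alt grid line_number column_number
instance (grid : List (List Int)) (line_number : Int) (column_number : Int) (out : Option Int) : Decidable (Spec_get_cell_number_from_coordinates grid line_number column_number out) := by unfold Spec_get_cell_number_from_coordinates; infer_instance

-- ===== CLAIM (what is proved, stated in full; the proofs are below) =====
def Claim_equal_get_cell_number_from_coordinates : Prop := ∀ (grid : List (List Int)) (line_number : Int) (column_number : Int), Dom_get_cell_number_from_coordinates grid line_number column_number → Spec_get_cell_number_from_coordinates grid line_number column_number (get_cell_number_from_coordinates grid line_number column_number)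

-- ===== LEMMAS AND PROOFS =====

-- the inner loop returns early exactly when the line matches and col reaches column_number
theorem pvAInner_hit (cnt : Nat) : ∀ (col cell line ln cn : Int),
    ln = line → col + 1 ≤ cn → cn ≤ col + cnt →
    pvAInner cnt col cell line ln cn = (some (cell + (cn - col)), cell + (cn - col)) := by
  induction cnt with
  | zero => intro col cell line ln cn _ h1 h2; omega
  | succ n ih =>
    intro col cell line ln cn hl h1 h2
    simp only [pvAInner]
    by_cases hc : cn = col + 1
    · simp [hl, hc]
    · rw [if_neg (by simp [hl]; omega)]
      rw [ih (col + 1) (cell + 1) line ln cn hl (by omega) (by push_cast at h2; omega)]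
      simp only [Prod.mk.injEq, Option.some.injEq]
      omega

theorem pvAInner_miss (cnt : Nat) : ∀ (col cell line ln cn : Int),
    (ln ≠ line ∨ cn < col + 1 ∨ col + cnt < cn) →
    pvAInner cnt col cell line ln cn = (none, cell + cnt) := by
  induction cnt with
  | zero => intro col cell line ln cn _; simp [pvAInner]
  | succ n ih =>
    intro col cell line ln cn h
    simp only [pvAInner]
    rw [if_neg (by push_cast at h ⊢; rcases h with h | h | h <;> simp_all <;> omega)]
    rw [ih (col + 1) (cell + 1) line ln cn (by push_cast at h ⊢; omega)]
    simp only [Prod.mk.injEq]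
    exact ⟨trivial, by push_cast; ring⟩

-- characterisation of the whole outer loop, generalizing the carried state
theorem pvAOuter_char (rows : List (List Int)) : ∀ (line cell ln cn : Int),
    pvAOuter rows line cell ln cn =
      (if 0 ≤ ln - line ∧ ln - line < rows.length ∧
          1 ≤ cn ∧ cn ≤ (rows.getD (ln - line).toNat []).length then
        some (cell + (((rows.take (ln - line).toNat).map List.length).sum : Int) + cn)
      else none) := by
  induction rows with
  | nil => intro line cell ln cn; simp [pvAOuter]; omega
  | cons r rs ih =>
    intro line cell ln cn
    simp only [pvAOuter]
    by_cases hl : ln = line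
    · have h0 : ln - line = 0 := by omega
      by_cases hc : 1 ≤ cn ∧ cn ≤ (r.length : Int)
      · rw [pvAInner_hit r.length 0 cell line ln cn hl (by omega) (by omega)]
        dsimp only
        rw [if_pos (by simp [h0]; omega)]
        simp [h0]
      · rw [pvAInner_miss r.length 0 cell line ln cn (by omega)]
        dsimp only
        rw [ih (line + 1) (cell + r.length) ln cn]
        rw [if_neg (by omega), if_neg (by simp [h0]; omega)]
    · rw [pvAInner_miss r.length 0 cell line ln cn (Or.inl hl)]
      dsimp only
      rw [ih (line + 1) (cell + r.length) ln cn]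
      by_cases hpos : 0 ≤ ln - (line + 1)
      · have h1 : (ln - line).toNat = (ln - (line + 1)).toNat + 1 := by omega
        simp only [h1, List.getD_cons_succ, List.take_succ_cons, List.map_cons,
          List.sum_cons, List.length_cons]
        split_ifs with ha hb hc2
        · congr 1; push_cast; ring
        · exact absurd ⟨by omega, by push_cast at ha ⊢; omega, ha.2.2.1, ha.2.2.2⟩ hb
        · exact absurd ⟨by omega, by push_cast at hc2 ⊢; omega, hc2.2.2.1, hc2.2.2.2⟩ ha
        · rfl
      · rw [if_neg (by omega), if_neg (by omega)]

-- ===== VERDICT (by name: the statement is the Claim_ definition above) =====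
theorem get_cell_number_from_coordinates_spec : Claim_equal_get_cell_number_from_coordinates := by
  intro grid ln cn _
  unfold Spec_get_cell_number_from_coordinates get_cell_number_from_coordinates get_cell_number_from_coordinates_alt
  rw [pvAOuter_char grid 0 0 ln cn]
  simp
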